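-- pv_equiv track=rewrite | github.com/EnricoChi/algo | 4/one.py | search_lst
-- ===== SOURCE A (Python) =====
-- def search_lst(lst):
--     result_lst = []
--     # Мы же будем искать предшевствующие элементы, поэтому логично начать искать их с конца списка
--     invert_lst = lst[::-1]
--     # Будет циклить по индексу, а не по значению
--     for i in range(len(invert_lst)):
--         # Элемент с текущим индексом
--         current = invert_lst[i]
--         # Будем двигаться вправо по списку, исключая текущий элемент
--         # и смотреть, чтобы его не было в результирующем
--         if current in invert_lst[i + 1:] and current not in result_lst:
--             result_lst.append(invert_lst[i])
--     return result_lst[::-1]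
-- ===== SOURCE B (Python) =====
-- def search_lst(lst):
--     # One forward pass: seen tracks values met before; dups keeps duplicated
--     # values ordered by last occurrence (move-to-end on each repeat).
--     seen = set()
--     dups = []
--     for x in lst:
--         if x in seen:
--             if x in dups:
--                 dups.remove(x)
--             dups.append(x)
--         else:
--             seen.add(x)
--     return dups
-- ===== Notes on version B (the rewrite author's own statement) =====
-- stated objective: faster
-- what changed: A reverses the list and, for each position, re-scans the remaining tail and the result list before reversing the result again; B makes one forward pass keeping a hash seen-set and a duplicates list maintained in last-occurrence order by move-to-end.
import Mathlib
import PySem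

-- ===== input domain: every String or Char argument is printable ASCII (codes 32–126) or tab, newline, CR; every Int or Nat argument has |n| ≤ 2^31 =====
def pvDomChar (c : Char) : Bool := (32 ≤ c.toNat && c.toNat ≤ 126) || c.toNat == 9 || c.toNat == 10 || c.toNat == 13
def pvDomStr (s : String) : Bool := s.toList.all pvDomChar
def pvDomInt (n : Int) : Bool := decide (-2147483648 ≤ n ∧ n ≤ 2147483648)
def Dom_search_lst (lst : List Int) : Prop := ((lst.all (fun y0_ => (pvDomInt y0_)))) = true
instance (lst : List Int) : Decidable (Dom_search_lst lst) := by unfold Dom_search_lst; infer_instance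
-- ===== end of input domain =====

-- B replaces A's reversed repeated tail-scan (and double reversal) by a single forward
-- pass maintaining a seen-set and a move-to-end duplicates list; objective: faster (measured).

-- ===== PORT A =====
def search_lst (lst : List Int) : List Int :=
  let invert_lst := (PySem.List.slice? lst none none (-1)).getD []
  let result_lst := (PySem.List.pyRange 0 (PySem.List.len invert_lst) 1).foldl
    (fun result_lst i =>
      let current := PySem.List.pyGetD invert_lst i 0
      if (PySem.List.slice invert_lst (some (i + 1)) none).contains current
         && !(result_lst.contains current)
      then result_lst ++ [current] else result_lst) []
  (PySem.List.slice? result_lst none none (-1)).getD []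

-- ===== PORT B =====
def search_lst_alt (lst : List Int) : List Int :=
  (lst.foldl
    (fun (st : PySem.Set Int × List Int) x =>
      let seen := st.1
      let dups := st.2
      if PySem.Set.contains seen x then
        (seen, (if dups.contains x then (PySem.List.remove? dups x).getD dups else dups) ++ [x])
      else
        (PySem.Set.add seen x, dups))
    (PySem.Set.empty, [])).2

-- ===== PRECONDITION & SPEC =====
def Spec_search_lst (lst : List Int) (out : List Int) : Prop := out = search_lst_alt lst
instance (lst : List Int) (out : List Int) : Decidable (Spec_search_lst lst out) := by unfold Spec_search_lst; infer_instance

-- ===== CLAIM (what is proved, stated in full; the proofs are below) =====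
def Claim_equal_search_lst : Prop := ∀ (lst : List Int), Dom_search_lst lst → Spec_search_lst lst (search_lst lst)

-- ===== LEMMAS AND PROOFS =====

/-- The appended part of A's loop: processing the remaining (reversed) list, with `acc`
standing for the result collected so far (only its membership matters). -/
def gaux : List Int → List Int → List Int
  | [], _ => []
  | x :: r, acc =>
    if r.contains x && !acc.contains x then x :: gaux r (acc ++ [x]) else gaux r acc

theorem gaux_filter (m : List Int) : ∀ acc,
    gaux m acc = (gaux m []).filter (fun y => !acc.contains y) := by
  induction m with
  | nil => intro acc; simp [gaux]
  | cons x r ih =>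
    intro acc
    by_cases hr : x ∈ r
    · by_cases ha : x ∈ acc
      · simp [gaux, hr, ha, ih acc, ih [x], List.filter_filter]
        apply List.filter_congr; intro y _
        by_cases hyx : y = x
        · subst hyx; simp [ha]
        · simp [hyx]
      · simp [gaux, hr, ha, ih (acc ++ [x]), ih [x], List.filter_filter]
    · simp [gaux, hr, ih acc]

theorem foldl_eq_gaux (invert : List Int) (d : Int) :
    ∀ (t : List Int) (a : Nat) (acc : List Int), invert.drop a = t →
      (PySem.List.pyRange ((a : Nat) : Int) (PySem.List.len invert) 1).foldl
        (fun result_lst i =>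
          if (PySem.List.slice invert (some (i + 1)) none).contains (PySem.List.pyGetD invert i d)
             && !(result_lst.contains (PySem.List.pyGetD invert i d))
          then result_lst ++ [PySem.List.pyGetD invert i d] else result_lst) acc
      = acc ++ gaux t acc := by
  intro t
  induction t with
  | nil =>
    intro a acc h
    have hlen : invert.length ≤ a := by
      by_contra hlt; push Not at hlt
      have := List.drop_eq_nil_iff.mp h; omega
    rw [PySem.List.pyRange_one_eq_nil (by simp [PySem.List.len]; omega)]
    simp [gaux]
  | cons x r ih =>
    intro a acc h
    have ha : a < invert.length := by
      by_contra hge; push Not at hge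
      have h2 := List.drop_eq_nil_iff.mpr hge
      rw [h] at h2; simp at h2
    have hx : invert[a] = x := by
      have := congrArg (fun l => l[0]?) h
      simpa [List.getElem?_drop, List.getElem?_eq_getElem ha] using this
    have hr : invert.drop (a + 1) = r := by
      have := congrArg List.tail h
      simpa [List.tail_drop] using this
    rw [PySem.List.pyRange_one_cons (by simp [PySem.List.len]; omega)]
    simp only [List.foldl_cons]
    have hslice : PySem.List.slice invert (some ((a : Int) + 1)) none = r := by
      rw [show ((a : Int) + 1) = ((a + 1 : Nat) : Int) by push_cast; ring,
        PySem.List.slice_from_natCast, hr]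
    have hget : PySem.List.pyGetD invert (a : Int) d = x := by
      simp [List.getD_eq_getElem?_getD, List.getElem?_eq_getElem ha, hx]
    simp only [hget, hslice]
    have harg : ((a : Int) + 1) = (((a + 1 : Nat) : Int)) := by push_cast; ring
    by_cases hxr : x ∈ r
    · by_cases hxa : x ∈ acc
      · rw [if_neg (by simp [hxa]), harg, ih (a + 1) acc hr]
        simp [gaux, hxr, hxa]
      · rw [if_pos (by simp [hxr, hxa]), harg, ih (a + 1) (acc ++ [x]) hr]
        simp [gaux, hxr, hxa]
    · rw [if_neg (by simp [hxr]), harg, ih (a + 1) acc hr]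
      simp [gaux, hxr]

theorem searchA_eq (lst : List Int) : search_lst lst = (gaux lst.reverse []).reverse := by
  unfold search_lst
  simp only [PySem.List.slice?_none_none_neg_one, Option.getD_some]
  rw [show (0 : Int) = ((0 : Nat) : Int) from rfl,
    foldl_eq_gaux lst.reverse ((0 : Nat) : Int) lst.reverse 0 [] (by simp)]
  simp

theorem nodup_erase_eq_filter (l : List Int) (a : Int) (h : l.Nodup) :
    l.erase a = l.filter (fun y => !decide (y = a)) := by
  rw [List.Nodup.erase_eq_filter h]
  apply List.filter_congr; intro y _
  by_cases hy : y = a <;> simp [hy]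

theorem alt_invariant (lst : List Int) :
    (lst.foldl
      (fun (st : PySem.Set Int × List Int) x =>
        let seen := st.1
        let dups := st.2
        if PySem.Set.contains seen x then
          (seen, (if dups.contains x then (PySem.List.remove? dups x).getD dups else dups) ++ [x])
        else
          (PySem.Set.add seen x, dups))
      (PySem.Set.empty, []))
    = (PySem.Set.ofList lst, (gaux lst.reverse []).reverse)
    ∧ (gaux lst.reverse []).reverse.Nodup := by
  induction lst using List.reverseRecOn with
  | nil => simp [gaux, PySem.Set.ofList, PySem.Set.empty]
  | append_singleton lst a ih =>
    rw [List.foldl_append, ih.1]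
    have hd := ih.2
    simp only [List.foldl_cons, List.foldl_nil]
    by_cases hal : a ∈ lst
    · have hmem := (PySem.Set.mem_ofList lst a).mpr hal
      have hcontains : PySem.Set.contains (PySem.Set.ofList lst) a = true :=
        (PySem.Set.contains_iff _ _).mpr hmem
      rw [if_pos hcontains]
      have hA : gaux ((lst ++ [a]).reverse) [] =
          a :: (gaux lst.reverse []).filter (fun y => !decide (y = a)) := by
        rw [List.reverse_append]
        simp [gaux, hal, gaux_filter lst.reverse [a]]
      rw [hA]
      simp only [List.reverse_cons, ← List.filter_reverse]
      have hna : a ∉ (gaux lst.reverse []).reverse.filter (fun y => !decide (y = a)) := by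
        simp [List.mem_filter]
      constructor
      · refine Prod.ext ?_ ?_
        · simp [PySem.Set.ofList_append_singleton, PySem.Set.add_of_mem hmem]
        · show (if (gaux lst.reverse []).reverse.contains a = true then
              (PySem.List.remove? (gaux lst.reverse []).reverse a).getD (gaux lst.reverse []).reverse
            else (gaux lst.reverse []).reverse) ++ [a]
            = (gaux lst.reverse []).reverse.filter (fun y => !decide (y = a)) ++ [a]
          by_cases had : a ∈ (gaux lst.reverse []).reverse
          · rw [if_pos (by simpa using had), PySem.List.remove?_eq_some_erase _ a had,
              Option.getD_some, nodup_erase_eq_filter _ a hd]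
          · rw [if_neg (by simpa using had), List.filter_eq_self.mpr]
            intro y hy
            simp only [Bool.not_eq_eq_eq_not, Bool.not_true, decide_eq_false_iff_not]
            intro he; exact had (he ▸ hy)
      · refine List.Nodup.append (List.Nodup.filter _ hd) (List.nodup_singleton a) ?_
        intro y hy
        simp only [List.mem_singleton]
        intro he; subst he; exact hna hy
    · have hnmem : a ∉ PySem.Set.ofList lst := fun hm => hal ((PySem.Set.mem_ofList lst a).mp hm)
      have hcontains : PySem.Set.contains (PySem.Set.ofList lst) a = false := by
        by_contra hc
        exact hnmem ((PySem.Set.contains_iff _ _).mp (by revert hc; cases PySem.Set.contains (PySem.Set.ofList lst) a <;> simp))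
      rw [if_neg (by simpa using hal)]
      have hA : gaux ((lst ++ [a]).reverse) [] = gaux lst.reverse [] := by
        rw [List.reverse_append]
        simp [gaux, hal]
      rw [hA]
      exact ⟨by rw [PySem.Set.ofList_append_singleton, PySem.Set.add_of_not_mem hnmem], hd⟩

-- ===== VERDICT (by name: the statement is the Claim_ definition above) =====
theorem search_lst_spec : Claim_equal_search_lst := by
  intro lst _
  unfold Spec_search_lst search_lst_alt
  rw [(alt_invariant lst).1, searchA_eq]
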